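-- pv_equiv track=rewrite | github.com/dessertivore/advent-of-code-2023 | day-19/day_19.py | go_through_ratings
-- ===== SOURCE A (Python) =====
-- def go_through_ratings(workflows: dict, ratings: dict) -> int:
--     """
--     Sift through ratings to see which are accepted. Sum all numbers of accepted ratings.
--     """
--     all_nums = []
--     for rating in ratings.values():
--         finished = False
--         step_number = 0
--         workflow_key = "in"
--         while not finished:
--             while step_number < len(workflows[workflow_key][0]) and not finished:
--                 rating_category = workflows[workflow_key][0][step_number][0]
--                 operator = workflows[workflow_key][0][step_number][1]
--                 comparator_value = workflows[workflow_key][0][step_number][2]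
--                 outcome = workflows[workflow_key][0][step_number][3]
--                 if operator == "<" and rating[rating_category] >= comparator_value:
--                     step_number += 1  # if it doesn't meet condition, go to next step
--
--                 elif operator == ">" and rating[rating_category] <= comparator_value:
--                     step_number += 1
--
--                 elif operator == "=" and rating[rating_category] != comparator_value:
--                     step_number += 1
--
--                 else:
--                     if outcome == "R":
--                         finished = True
--                         break
--                     elif outcome == "A":
--                         all_nums.append(sum(rating.values()))
--                         finished = True
--                         break
--                     else:
--                         workflow_key = outcome
--                         step_number = 0
--             if step_number == len(workflows[workflow_key][0]):
--                 outcome = workflows[workflow_key][1]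
--                 if outcome == "R":
--                     break
--                 elif outcome == "A":
--                     all_nums.append(sum(rating.values()))
--                     break
--                 else:
--                     workflow_key = outcome
--                     step_number = 0
--     return sum(all_nums)
-- ===== SOURCE B (Python) =====
-- def go_through_ratings(workflows: dict, ratings: dict) -> int:
--     """
--     Sift through ratings to see which are accepted. Sum all numbers of accepted ratings.
--     """
--
--     def matches(op, rating, cat, val):
--         if op == "<":
--             return rating[cat] < val
--         if op == ">":
--             return rating[cat] > val
--         if op == "=":
--             return rating[cat] == val
--         return True
--
--     def resolve(key, rating):
--         rules, default = workflows[key]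
--         outcome = next(
--             (out for cat, op, val, out in rules if matches(op, rating, cat, val)),
--             default,
--         )
--         if outcome in ("A", "R"):
--             return outcome
--         return resolve(outcome, rating)
--
--     return sum(
--         sum(rating.values())
--         for rating in ratings.values()
--         if resolve("in", rating) == "A"
--     )
-- ===== Notes on version B (the rewrite author's own statement) =====
-- stated objective: simpler
-- what changed: Replaces the flag-and-index-driven nested-while state machine with a recursive resolve(key, rating) that picks the first matching rule (or the default) with next() over a generator and recurses into jump targets, summing accepted ratings in one comprehension. Pre_ excludes (besides duplicate-key association lists no Python dict produces) exactly the inputs whose workflow graph, followed from 'in' along every rule outcome, hits a missing workflow key, a missing rating category on a comparison rule, or a cycle: on such inputs A can raise KeyError or loop forever; …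
-- outside the precondition, e.g. on go_through_ratings({'in': ([('x', '<', 10, 'A')], 'b')}, {'r1': {'x': 3}}): A returns 3, B returns 3; on go_through_ratings({'in': ([('x', '<', 10, 'in')], 'A')}, {'r1': {'x': 20}}): A returns 20, B returns 20; on go_through_ratings({'in': ([('y', '<', 1, 'R')], 'A')}, {'r1': {'x': 2}}): A raises KeyError, B raises KeyError
import Mathlib
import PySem

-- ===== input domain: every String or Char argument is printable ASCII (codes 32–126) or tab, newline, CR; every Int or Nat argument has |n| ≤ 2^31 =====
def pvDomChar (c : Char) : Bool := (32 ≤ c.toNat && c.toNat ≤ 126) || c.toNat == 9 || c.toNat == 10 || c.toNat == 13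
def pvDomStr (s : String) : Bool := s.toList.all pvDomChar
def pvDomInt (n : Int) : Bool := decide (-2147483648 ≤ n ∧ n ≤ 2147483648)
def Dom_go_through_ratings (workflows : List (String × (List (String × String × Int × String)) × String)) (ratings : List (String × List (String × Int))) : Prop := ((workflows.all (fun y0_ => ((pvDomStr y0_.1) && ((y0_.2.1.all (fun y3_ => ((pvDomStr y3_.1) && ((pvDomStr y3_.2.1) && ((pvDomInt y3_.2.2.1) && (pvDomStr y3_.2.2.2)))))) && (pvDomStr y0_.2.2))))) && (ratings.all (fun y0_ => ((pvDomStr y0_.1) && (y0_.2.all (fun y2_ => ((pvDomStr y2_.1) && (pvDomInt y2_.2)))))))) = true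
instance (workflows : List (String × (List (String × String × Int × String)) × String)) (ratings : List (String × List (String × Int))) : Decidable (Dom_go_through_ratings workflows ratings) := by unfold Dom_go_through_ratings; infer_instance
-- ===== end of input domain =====

-- B replaces A's flag-and-index nested-while state machine by a recursive resolve over the
-- workflow graph that selects the first matching rule (or the default) and recurses into
-- jump targets (objective: simpler decomposition, same cost).


-- ===== PORT A =====
-- workflows[k] (dict lookup = first match; the `none` default is unreachable under Pre_)
def pvWfGetA (workflows : List (String × (List (String × String × Int × String)) × String)) (k : String) : (List (String × String × Int × String)) × String :=
  match workflows.find? (fun w => w.1 == k) with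
  | some w => w.2
  | none => ([], "R")

-- rating[cat] (KeyError excluded by Pre_)
def pvRatGetA (rating : List (String × Int)) (cat : String) : Int :=
  match rating.find? (fun p => p.1 == cat) with
  | some p => p.2
  | none => 0

-- the three `elif` tests of A that send it to the next step
def pvFailA (op : String) (r v : Int) : Bool :=
  (op == "<" && decide (v ≤ r)) || (op == ">" && decide (r ≤ v)) || (op == "=" && (r != v))

-- A's while-machine over the state (workflow_key, step_number); `some b` = finished with
-- b = accepted; fuel is only a totality guard (`none` is unreachable under Pre_).
def pvRunA (workflows : List (String × (List (String × String × Int × String)) × String)) (rating : List (String × Int)) : Nat → String → Nat → Option Bool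
  | 0, _, _ => none
  | fuel+1, key, step =>
    let wf := pvWfGetA workflows key
    if step < wf.1.length then
      let rl := wf.1.getD step ("", "", 0, "")
      if pvFailA rl.2.1 (pvRatGetA rating rl.1) rl.2.2.1 then
        pvRunA workflows rating fuel key (step+1)
      else if rl.2.2.2 == "R" then some false
      else if rl.2.2.2 == "A" then some true
      else pvRunA workflows rating fuel rl.2.2.2 0
    else
      if wf.2 == "R" then some false
      else if wf.2 == "A" then some true
      else pvRunA workflows rating fuel wf.2 0

def pvAsum (l : List (String × (List (String × String × Int × String)) × String)) : Nat :=
  (l.map (fun w => w.2.1.length + 1)).sum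

def pvFuelA (workflows : List (String × (List (String × String × Int × String)) × String)) : Nat :=
  (workflows.length + 1) * (pvAsum workflows + 1) + 1

def go_through_ratings (workflows : List (String × (List (String × String × Int × String)) × String)) (ratings : List (String × List (String × Int))) : Int :=
  let all_nums := ratings.foldl (fun acc p =>
    if pvRunA workflows p.2 (pvFuelA workflows) "in" 0 = some true then
      acc ++ [(p.2.map Prod.snd).sum]
    else acc) ([] : List Int)
  all_nums.sum

-- ===== PORT B =====
def pvRatGetB (rating : List (String × Int)) (cat : String) : Int :=
  match rating.find? (fun p => p.1 == cat) with
  | some p => p.2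
  | none => 0

def pvMatchB (op : String) (rating : List (String × Int)) (cat : String) (v : Int) : Bool :=
  if op == "<" then decide (pvRatGetB rating cat < v)
  else if op == ">" then decide (v < pvRatGetB rating cat)
  else if op == "=" then pvRatGetB rating cat == v
  else true

def pvWfGetB (workflows : List (String × (List (String × String × Int × String)) × String)) (k : String) : (List (String × String × Int × String)) × String :=
  match workflows.find? (fun w => w.1 == k) with
  | some w => w.2
  | none => ([], "R")

-- B's resolve: first matching rule's outcome (else default); return it if final, else recurse.
def pvResolveB (workflows : List (String × (List (String × String × Int × String)) × String)) (rating : List (String × Int)) : Nat → String → Option String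
  | 0, _ => none
  | fuel+1, key =>
    let wf := pvWfGetB workflows key
    let outcome := match wf.1.find? (fun q => pvMatchB q.2.1 rating q.1 q.2.2.1) with
                   | some q => q.2.2.2
                   | none => wf.2
    if outcome == "A" || outcome == "R" then some outcome
    else pvResolveB workflows rating fuel outcome

def go_through_ratings_alt (workflows : List (String × (List (String × String × Int × String)) × String)) (ratings : List (String × List (String × Int))) : Int :=
  ((ratings.filter (fun p => pvResolveB workflows p.2 (workflows.length + 2) "in" = some "A")).map
    (fun p => (p.2.map Prod.snd).sum)).sum

-- ===== PRECONDITION & SPEC =====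
-- the outcomes a workflow can actually take: rules up to and including the first
-- always-matching rule (operator not <,>,=), plus the default if every rule can fail
def pvTargets : List (String × String × Int × String) → String → List String
  | [], dflt => [dflt]
  | q :: rest, dflt =>
    if q.2.1 = "<" ∨ q.2.1 = ">" ∨ q.2.1 = "=" then q.2.2.2 :: pvTargets rest dflt
    else [q.2.2.2]

-- every comparison rule A may evaluate in this workflow (those before the first
-- unconditional rule) names a category present in every rating
def pvCatsOk (ratings : List (String × List (String × Int))) (rules : List (String × String × Int × String)) : Bool :=
  (rules.takeWhile (fun q => q.2.1 == "<" || q.2.1 == ">" || q.2.1 == "=")).all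
    (fun q => ratings.all (fun p => p.2.any (fun c => c.1 == q.1)))

-- a property of the input's workflow GRAPH, not a run of either program: every edge path
-- from k (edges = rule outcomes) reaches "A"/"R" within n hops, every key on the way has a
-- workflow, and every comparison rule on the way names a category present in every rating.
-- No rating value is read and no comparison is evaluated; the bound n (instantiated with
-- |workflows|+1, the longest possible simple path) only makes acyclicity decidable.
def pvOk (workflows : List (String × (List (String × String × Int × String)) × String)) (ratings : List (String × List (String × Int))) : Nat → String → Bool
  | 0, k => k == "A" || k == "R"
  | n+1, k => k == "A" || k == "R" ||
      (match workflows.find? (fun w => w.1 == k) with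
       | none => false
       | some w => pvCatsOk ratings w.2.1 && (pvTargets w.2.1 w.2.2).all (fun t => pvOk workflows ratings n t))

-- Pre_ excludes the inputs whose workflow graph, followed from "in", hits a missing workflow
-- key, a missing rating category on a reachable comparison rule, or a cycle — on such inputs
-- Python A can raise KeyError or loop forever — plus duplicate-key association lists that no
-- Python dict produces.  The graph reachability ignores which comparisons actually fire, so
-- it conservatively also excludes inputs whose only defect sits on a branch the concrete
-- ratings never take (there A returns and agrees with B; see the cites).
def Pre_go_through_ratings (workflows : List (String × (List (String × String × Int × String)) × String)) (ratings : List (String × List (String × Int))) : Prop :=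
  ratings = [] ∨
  ((workflows.map Prod.fst).Nodup ∧
   (ratings.map Prod.fst).Nodup ∧
   (∀ p ∈ ratings, (p.2.map Prod.fst).Nodup) ∧
   pvOk workflows ratings (workflows.length + 1) "in" = true)

instance (workflows : List (String × (List (String × String × Int × String)) × String)) (ratings : List (String × List (String × Int))) : Decidable (Pre_go_through_ratings workflows ratings) := by
  unfold Pre_go_through_ratings; infer_instance

def pvWitness_go_through_ratings : (List (String × (List (String × String × Int × String)) × String)) × (List (String × List (String × Int))) :=
  ([("in", [("x", "<", 10, "A")], "R")], [("r1", [("x", 3)])])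

def Spec_go_through_ratings (workflows : List (String × (List (String × String × Int × String)) × String)) (ratings : List (String × List (String × Int))) (out : Int) : Prop := out = go_through_ratings_alt workflows ratings
instance (workflows : List (String × (List (String × String × Int × String)) × String)) (ratings : List (String × List (String × Int))) (out : Int) : Decidable (Spec_go_through_ratings workflows ratings out) := by unfold Spec_go_through_ratings; infer_instance

-- ===== CLAIM (what is proved, stated in full; the proofs are below) =====
def Claim_equal_go_through_ratings : Prop := ∀ (workflows : List (String × (List (String × String × Int × String)) × String)) (ratings : List (String × List (String × Int))), Dom_go_through_ratings workflows ratings → Pre_go_through_ratings workflows ratings → Spec_go_through_ratings workflows ratings (go_through_ratings workflows ratings)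

-- ===== LEMMAS AND PROOFS =====

-- proof-side helpers
def pvOutStr (b : Bool) : String := if b then "A" else "R"

def pvSelOut (rating : List (String × Int)) (rs : List (String × String × Int × String)) (dflt : String) : String :=
  match rs.find? (fun q => pvMatchB q.2.1 rating q.1 q.2.2.1) with
  | some q => q.2.2.2
  | none => dflt

def pvStepB (workflows : List (String × (List (String × String × Int × String)) × String)) (rating : List (String × Int)) (fb : Nat) (o : String) : Option String :=
  if o == "A" || o == "R" then some o else pvResolveB workflows rating fb o

lemma pvRatGet_eq : pvRatGetA = pvRatGetB := rfl

lemma pvFailA_eq (op : String) (rating : List (String × Int)) (cat : String) (v : Int) :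
    pvFailA op (pvRatGetA rating cat) v = ! pvMatchB op rating cat v := by
  rw [pvRatGet_eq]
  unfold pvFailA pvMatchB
  by_cases h1 : op = "<"
  · subst h1; simp [← decide_not]
  · by_cases h2 : op = ">"
    · subst h2; simp [← decide_not]
    · by_cases h3 : op = "="
      · subst h3; simp [bne]
      · simp [h1, h2, h3]

lemma pvSelOut_cons_neg (rating : List (String × Int)) (q : String × String × Int × String)
    (rs : List (String × String × Int × String)) (dflt : String)
    (h : pvMatchB q.2.1 rating q.1 q.2.2.1 = false) :
    pvSelOut rating (q :: rs) dflt = pvSelOut rating rs dflt := by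
  unfold pvSelOut
  rw [List.find?_cons_of_neg (by simp [h])]

lemma pvSelOut_cons_pos (rating : List (String × Int)) (q : String × String × Int × String)
    (rs : List (String × String × Int × String)) (dflt : String)
    (h : pvMatchB q.2.1 rating q.1 q.2.2.1 = true) :
    pvSelOut rating (q :: rs) dflt = q.2.2.2 := by
  unfold pvSelOut
  rw [List.find?_cons_of_pos (by simp [h])]

lemma pvWfGetA_eq (wfs : List (String × (List (String × String × Int × String)) × String))
    (key : String) (rules : List (String × String × Int × String)) (dflt : String)
    (hget : wfs.find? (fun w => w.1 == key) = some (key, rules, dflt)) :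
    pvWfGetA wfs key = (rules, dflt) := by
  simp [pvWfGetA, hget]

lemma pvResolveB_succ (wfs : List (String × (List (String × String × Int × String)) × String))
    (rating : List (String × Int)) (fb : Nat) (key : String)
    (rules : List (String × String × Int × String)) (dflt : String)
    (hget : wfs.find? (fun w => w.1 == key) = some (key, rules, dflt)) :
    pvResolveB wfs rating (fb+1) key = pvStepB wfs rating fb (pvSelOut rating rules dflt) := by
  simp only [pvResolveB, pvWfGetB, hget, pvStepB, pvSelOut]

-- helper facts about pvFailA / pvTargets
lemma pvOpReal_of_fail (op : String) (r v : Int) (h : pvFailA op r v = true) :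
    op = "<" ∨ op = ">" ∨ op = "=" := by
  by_cases h1 : op = "<"
  · exact Or.inl h1
  by_cases h2 : op = ">"
  · exact Or.inr (Or.inl h2)
  by_cases h3 : op = "="
  · exact Or.inr (Or.inr h3)
  simp [pvFailA, h1, h2, h3] at h

lemma pvTargets_cons_real (q : String × String × Int × String)
    (rs : List (String × String × Int × String)) (dflt : String)
    (h : q.2.1 = "<" ∨ q.2.1 = ">" ∨ q.2.1 = "=") :
    pvTargets (q :: rs) dflt = q.2.2.2 :: pvTargets rs dflt := by
  simp [pvTargets, h]

lemma pvTargets_out_mem (q : String × String × Int × String)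
    (rs : List (String × String × Int × String)) (dflt : String) :
    q.2.2.2 ∈ pvTargets (q :: rs) dflt := by
  by_cases h : q.2.1 = "<" ∨ q.2.1 = ">" ∨ q.2.1 = "="
  · simp [pvTargets, h]
  · simp [pvTargets, h]

-- destructure pvOk at a non-final key
lemma pvOk_elim (wfs : List (String × (List (String × String × Int × String)) × String))
    (rats : List (String × List (String × Int))) (n : Nat) (key : String)
    (h : pvOk wfs rats (n+1) key = true) (hkA : key ≠ "A") (hkR : key ≠ "R") :
    ∃ rules dflt, wfs.find? (fun w => w.1 == key) = some (key, rules, dflt) ∧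
      ∀ t ∈ pvTargets rules dflt, pvOk wfs rats n t = true := by
  simp only [pvOk, Bool.or_eq_true, beq_iff_eq] at h
  rcases h with (h | h) | h
  · exact absurd h hkA
  · exact absurd h hkR
  · cases hf : wfs.find? (fun w => w.1 == key) with
    | none => rw [hf] at h; simp at h
    | some w =>
      rw [hf] at h
      have hk : w.1 = key := by simpa using List.find?_some hf
      refine ⟨w.2.1, w.2.2, by subst hk; rfl, ?_⟩
      intro t ht
      simp only [Bool.and_eq_true, List.all_eq_true] at h
      exact h.2 t ht

-- the scan over one workflow's rules, assuming every reachable jump target already resolves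
lemma pvInner (wfs : List (String × (List (String × String × Int × String)) × String))
    (rating : List (String × Int)) (key : String)
    (rules : List (String × String × Int × String)) (dflt : String)
    (hget : wfs.find? (fun w => w.1 == key) = some (key, rules, dflt))
    (S L : Nat) :
    ∀ k step, step ≤ rules.length → rules.length - step = k →
    (∀ t ∈ pvTargets (rules.drop step) dflt, t = "A" ∨ t = "R" ∨
      (t ≠ "A" ∧ t ≠ "R" ∧ ∃ b : Bool,
        (∀ fa, S + 1 ≤ fa → pvRunA wfs rating fa t 0 = some b) ∧
        (∀ fb, L + 1 ≤ fb → pvResolveB wfs rating fb t = some (pvOutStr b)))) →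
    ∃ b : Bool,
      (∀ fa, (rules.length + 1) + S + 1 ≤ fa + step → pvRunA wfs rating fa key step = some b) ∧
      (∀ fb, L + 1 ≤ fb → pvStepB wfs rating fb (pvSelOut rating (rules.drop step) dflt) = some (pvOutStr b)) := by
  intro k
  induction k with
  | zero =>
    intro step hstep hk htgt
    have hsl : step = rules.length := by omega
    subst hsl
    have hdfl := htgt dflt (by simp [List.drop_length, pvTargets])
    rcases hdfl with hA | hR | ⟨hnA, hnR, b, hbA, hbB⟩
    · refine ⟨true, ?_, ?_⟩
      · intro fa hfa
        obtain ⟨fa', rfl⟩ : ∃ fa', fa = fa' + 1 := ⟨fa - 1, by omega⟩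
        simp [pvRunA, pvWfGetA_eq wfs key rules dflt hget, hA]
      · intro fb hfb
        simp [pvSelOut, pvStepB, hA, pvOutStr]
    · refine ⟨false, ?_, ?_⟩
      · intro fa hfa
        obtain ⟨fa', rfl⟩ : ∃ fa', fa = fa' + 1 := ⟨fa - 1, by omega⟩
        simp [pvRunA, pvWfGetA_eq wfs key rules dflt hget, hR]
      · intro fb hfb
        simp [pvSelOut, pvStepB, hR, pvOutStr]
    · refine ⟨b, ?_, ?_⟩
      · intro fa hfa
        obtain ⟨fa', rfl⟩ : ∃ fa', fa = fa' + 1 := ⟨fa - 1, by omega⟩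
        simp [pvRunA, pvWfGetA_eq wfs key rules dflt hget, hnA, hnR]
        exact hbA fa' (by omega)
      · intro fb hfb
        simp [pvSelOut, pvStepB, hnA, hnR]
        exact hbB fb (by omega)
  | succ k ihk =>
    intro step hstep hk htgt
    have hlt : step < rules.length := by omega
    have hdrop : rules.drop step = rules[step] :: rules.drop (step + 1) :=
      List.drop_eq_getElem_cons hlt
    have hgetD : rules.getD step ("", "", 0, "") = rules[step] := List.getD_eq_getElem rules _ hlt
    by_cases hfail : pvFailA (rules[step]).2.1 (pvRatGetA rating (rules[step]).1) (rules[step]).2.2.1 = true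
    · -- rule does not match: step + 1
      have hreal := pvOpReal_of_fail _ _ _ hfail
      have htcons : pvTargets (rules.drop step) dflt = (rules[step]).2.2.2 :: pvTargets (rules.drop (step + 1)) dflt := by
        rw [hdrop, pvTargets_cons_real _ _ _ hreal]
      have htgt' : ∀ t ∈ pvTargets (rules.drop (step + 1)) dflt, t = "A" ∨ t = "R" ∨
          (t ≠ "A" ∧ t ≠ "R" ∧ ∃ b : Bool,
            (∀ fa, S + 1 ≤ fa → pvRunA wfs rating fa t 0 = some b) ∧
            (∀ fb, L + 1 ≤ fb → pvResolveB wfs rating fb t = some (pvOutStr b))) := by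
        intro t ht
        exact htgt t (by rw [htcons]; exact List.mem_cons_of_mem _ ht)
      obtain ⟨b, hA, hB⟩ := ihk (step + 1) (by omega) (by omega) htgt'
      have hnm : pvMatchB (rules[step]).2.1 rating (rules[step]).1 (rules[step]).2.2.1 = false := by
        have := pvFailA_eq (rules[step]).2.1 rating (rules[step]).1 (rules[step]).2.2.1
        rw [hfail] at this
        exact (Bool.not_eq_true' _).mp this.symm
      refine ⟨b, ?_, ?_⟩
      · intro fa hfa
        obtain ⟨fa', rfl⟩ : ∃ fa', fa = fa' + 1 := ⟨fa - 1, by omega⟩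
        simp only [pvRunA, pvWfGetA_eq wfs key rules dflt hget, hlt, if_pos, hgetD, hfail]
        exact hA fa' (by omega)
      · intro fb hfb
        have hse : pvSelOut rating (rules.drop step) dflt = pvSelOut rating (rules.drop (step + 1)) dflt := by
          rw [hdrop, pvSelOut_cons_neg rating _ _ dflt hnm]
        rw [hse]; exact hB fb hfb
    · -- rule matches: outcome taken
      have hm : pvMatchB (rules[step]).2.1 rating (rules[step]).1 (rules[step]).2.2.1 = true := by
        have := pvFailA_eq (rules[step]).2.1 rating (rules[step]).1 (rules[step]).2.2.1
        rw [Bool.eq_false_iff.mpr hfail] at this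
        simpa using this.symm
      have hsel : pvSelOut rating (rules.drop step) dflt = (rules[step]).2.2.2 := by
        rw [hdrop, pvSelOut_cons_pos rating _ _ dflt hm]
      have hmemt : (rules[step]).2.2.2 ∈ pvTargets (rules.drop step) dflt := by
        rw [hdrop]; exact pvTargets_out_mem _ _ _
      rcases htgt _ hmemt with hA | hR | ⟨hnA, hnR, b, hbA, hbB⟩
      · refine ⟨true, ?_, ?_⟩
        · intro fa hfa
          obtain ⟨fa', rfl⟩ : ∃ fa', fa = fa' + 1 := ⟨fa - 1, by omega⟩
          simp [pvRunA, pvWfGetA_eq wfs key rules dflt hget, hlt, hfail, hA]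
        · intro fb hfb
          simp [pvStepB, hsel, hA, pvOutStr]
      · refine ⟨false, ?_, ?_⟩
        · intro fa hfa
          obtain ⟨fa', rfl⟩ : ∃ fa', fa = fa' + 1 := ⟨fa - 1, by omega⟩
          simp [pvRunA, pvWfGetA_eq wfs key rules dflt hget, hlt, hfail, hR]
        · intro fb hfb
          simp [pvStepB, hsel, hR, pvOutStr]
      · refine ⟨b, ?_, ?_⟩
        · intro fa hfa
          obtain ⟨fa', rfl⟩ : ∃ fa', fa = fa' + 1 := ⟨fa - 1, by omega⟩
          simp only [pvRunA, pvWfGetA_eq wfs key rules dflt hget, hlt, if_pos, hgetD, hfail,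
            if_false, Bool.false_eq_true]
          simp [hnA, hnR]
          exact hbA fa' (by omega)
        · intro fb hfb
          simp only [pvStepB, hsel]
          simp [hnA, hnR]
          exact hbB fb (by omega)

-- main invariant: along the graph reachability certificate pvOk, A's machine and B's
-- resolve compute the same verdict
lemma pvMainOk (wfs : List (String × (List (String × String × Int × String)) × String))
    (rats : List (String × List (String × Int))) (rating : List (String × Int)) :
    ∀ n key, pvOk wfs rats n key = true → key ≠ "A" → key ≠ "R" →
    ∃ b : Bool,
      (∀ fa, n * (pvAsum wfs + 1) + 1 ≤ fa → pvRunA wfs rating fa key 0 = some b) ∧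
      (∀ fb, n + 1 ≤ fb → pvResolveB wfs rating fb key = some (pvOutStr b)) := by
  intro n
  induction n with
  | zero =>
    intro key h hkA hkR
    simp only [pvOk, Bool.or_eq_true, beq_iff_eq] at h
    rcases h with h | h
    · exact absurd h hkA
    · exact absurd h hkR
  | succ n ihn =>
    intro key h hkA hkR
    obtain ⟨rules, dflt, hget, htg⟩ := pvOk_elim wfs rats n key h hkA hkR
    have htgt : ∀ t ∈ pvTargets rules dflt, t = "A" ∨ t = "R" ∨
        (t ≠ "A" ∧ t ≠ "R" ∧ ∃ b : Bool,
          (∀ fa, n * (pvAsum wfs + 1) + 1 ≤ fa → pvRunA wfs rating fa t 0 = some b) ∧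
          (∀ fb, n + 1 ≤ fb → pvResolveB wfs rating fb t = some (pvOutStr b))) := by
      intro t ht
      by_cases hA : t = "A"
      · exact Or.inl hA
      by_cases hR : t = "R"
      · exact Or.inr (Or.inl hR)
      exact Or.inr (Or.inr ⟨hA, hR, ihn t (htg t ht) hA hR⟩)
    obtain ⟨b, hA, hB⟩ := pvInner wfs rating key rules dflt hget
      (n * (pvAsum wfs + 1)) n rules.length 0 (Nat.zero_le _) rfl (by simpa using htgt)
    have hmem : (key, rules, dflt) ∈ wfs := List.mem_of_find?_eq_some hget
    have hlen : rules.length + 1 ≤ pvAsum wfs := by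
      have : rules.length + 1 ∈ wfs.map (fun w => w.2.1.length + 1) :=
        List.mem_map.mpr ⟨(key, rules, dflt), hmem, rfl⟩
      exact List.single_le_sum (fun x _ => Nat.zero_le x) _ this
    refine ⟨b, ?_, ?_⟩
    · intro fa hfa
      refine hA fa ?_
      have : (n + 1) * (pvAsum wfs + 1) + 1 = n * (pvAsum wfs + 1) + pvAsum wfs + 2 := by ring
      omega
    · intro fb hfb
      obtain ⟨fb', rfl⟩ : ∃ fb', fb = fb' + 1 := ⟨fb - 1, by omega⟩
      rw [pvResolveB_succ wfs rating fb' key rules dflt hget]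
      have := hB fb' (by omega)
      simpa using this

-- A's accumulator fold equals sum-of-map-of-filter
lemma pv_foldA (l : List (String × List (String × Int))) (f : (String × List (String × Int)) → Prop)
    [DecidablePred f] (g : (String × List (String × Int)) → Int) (acc : List Int) :
    (l.foldl (fun a p => if f p then a ++ [g p] else a) acc).sum =
      acc.sum + ((l.filter (fun p => decide (f p))).map g).sum := by
  induction l generalizing acc with
  | nil => simp
  | cons p rest ih =>
    simp only [List.foldl_cons, List.filter_cons]
    by_cases hp : f p
    · simp [hp, ih]
      omega
    · simp [hp, ih]

-- ===== VERDICT (by name: the statement is the Claim_ definition above) =====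
theorem go_through_ratings_spec : Claim_equal_go_through_ratings := by
  intro wfs ratings hdom hpre
  rcases hpre with hnil | ⟨_, _, _, hok⟩
  · subst hnil
    simp [Spec_go_through_ratings, go_through_ratings, go_through_ratings_alt]
  unfold Spec_go_through_ratings go_through_ratings go_through_ratings_alt
  rw [pv_foldA ratings (fun p => pvRunA wfs p.2 (pvFuelA wfs) "in" 0 = some true)
        (fun p => (p.2.map Prod.snd).sum) []]
  simp only [List.sum_nil, zero_add]
  congr 2
  apply List.filter_congr
  intro p hp
  obtain ⟨b, hA, hB⟩ := pvMainOk wfs ratings p.2 (wfs.length + 1) "in" hok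
    (by decide) (by decide)
  have hAeq : pvRunA wfs p.2 (pvFuelA wfs) "in" 0 = some b := hA (pvFuelA wfs) (by simp [pvFuelA])
  have hBeq : pvResolveB wfs p.2 (wfs.length + 2) "in" = some (pvOutStr b) := hB _ (by omega)
  rw [hAeq, hBeq]
  cases b <;> simp [pvOutStr]
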